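-- pv_equiv track=rewrite | github.com/pauljones0/RandomCode | JaneStreet.py | compute
-- ===== SOURCE A (Python) =====
-- from itertools import combinations, combinations_with_replacement
--
-- def translate(input):
--     count = 1
--     while sum(input) > 0:
--         input = (abs(input[0] - input[1]), abs(input[1] - input[2]), abs(input[2] - input[3]), abs(input[3] - input[0]))
--         count += 1
--     return count
--
-- def compute(x):
--     maxSteps = 1
--     minVals = []
--     valuesToGoOver = combinations(range(x+1), 2)
--     for i in valuesToGoOver:
--         zero = [0]
--         zero.extend(i)
--         zero.append(x)
--         steps = translate(zero)
--         if steps > maxSteps: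
--             maxSteps = steps
--             minVals = [i]
--         elif steps == maxSteps:
--             minVals.append(i)
--     minValue = 999999999999999
--     finalMinVals = []
--     for i in minVals:
--         curMin = sum(i)
--         if curMin < minValue:
--             minValue = sum(i)
--             finalMinVals = [i]
--         elif minValue == sum(i):
--             finalMinVals.append(i)
--     return maxSteps, minVals, minValue, finalMinVals
-- ===== SOURCE B (Python) =====
-- def translate(input):
--     count = 1
--     while sum(input) > 0:
--         input = (abs(input[0] - input[1]), abs(input[1] - input[2]), abs(input[2] - input[3]), abs(input[3] - input[0]))
--         count += 1
--     return count
--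
-- def compute(x):
--     # Build a table grouping each pair by its step count, then extract the
--     # answer from the table instead of maintaining running max/min state.
--     groups = {}
--     for a in range(x + 1):
--         for b in range(a + 1, x + 1):
--             steps = translate((0, a, b, x))
--             groups.setdefault(steps, []).append((a, b))
--     maxSteps = max(groups, default=1)
--     minVals = groups.get(maxSteps, [])
--     minValue = min((a + b for a, b in minVals), default=999999999999999)
--     finalMinVals = [p for p in minVals if p[0] + p[1] == minValue]
--     return maxSteps, minVals, minValue, finalMinVals
-- ===== Notes on version B (the rewrite author's own statement) =====
-- stated objective: alternative
-- what changed: Replaces A's running-max accumulation plus a second running-min rescan with a build-a-table decomposition: group every pair by its step count in a dict, take the max key, read its group, and extract the min-sum pairs by min + filter.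
import Mathlib
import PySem

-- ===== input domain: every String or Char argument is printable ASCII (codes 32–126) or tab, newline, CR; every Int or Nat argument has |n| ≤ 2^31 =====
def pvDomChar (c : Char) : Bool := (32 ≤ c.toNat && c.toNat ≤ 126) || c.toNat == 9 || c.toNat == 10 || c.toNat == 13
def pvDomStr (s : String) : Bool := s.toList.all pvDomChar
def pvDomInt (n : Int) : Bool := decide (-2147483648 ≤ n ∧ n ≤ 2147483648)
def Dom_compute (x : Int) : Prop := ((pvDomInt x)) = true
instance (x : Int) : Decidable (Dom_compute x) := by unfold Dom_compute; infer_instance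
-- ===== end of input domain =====

-- B replaces A's running-max accumulation + second rescan with a group-by-steps
-- table (dict), then extracts max key / its group / min-sum members from it.
-- Python's length-4 list/tuple argument of translate is ported as a 4-tuple
-- (named translatePy; the name translate is taken by Mathlib). The while loop
-- carries a fuel counter (1000) that only makes the recursion total; it is
-- never exhausted on the pairs compute feeds it.

-- ===== PORT A =====
-- shared helper: the while loop of translate (both Pythons define the same translate)
def translateLoop : Nat → Int → (Int × Int × Int × Int) → Int
  | 0, count, _ => count
  | fuel + 1, count, (a, b, c, d) =>
    if a + b + c + d > 0 then
      translateLoop fuel (count + 1) (|a - b|, |b - c|, |c - d|, |d - a|)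
    else count

def translatePy (input : Int × Int × Int × Int) : Int := translateLoop 1000 1 input

-- shared helper: combinations(range(x+1), 2) (both Pythons enumerate the same pairs)
def pairsOf (x : Int) : List (Int × Int) :=
  (PySem.List.pyRange 0 (x + 1) 1).flatMap (fun a =>
    (PySem.List.pyRange (a + 1) (x + 1) 1).map (fun b => (a, b)))

def compute (x : Int) : Int × (List (Int × Int)) × Int × (List (Int × Int)) :=
  let s1 := (pairsOf x).foldl
    (fun s i =>
      let steps := translatePy (0, i.1, i.2, x)
      if steps > s.1 then (steps, [i])
      else if steps = s.1 then (s.1, s.2 ++ [i])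
      else s)
    ((1 : Int), ([] : List (Int × Int)))
  let maxSteps := s1.1
  let minVals := s1.2
  let s2 := minVals.foldl
    (fun s i =>
      let curMin := i.1 + i.2
      if curMin < s.1 then (i.1 + i.2, [i])
      else if s.1 = i.1 + i.2 then (s.1, s.2 ++ [i])
      else s)
    ((999999999999999 : Int), ([] : List (Int × Int)))
  (maxSteps, minVals, s2.1, s2.2)

-- ===== PORT B =====
def compute_alt (x : Int) : Int × (List (Int × Int)) × Int × (List (Int × Int)) :=
  let groups := (pairsOf x).foldl
    (fun d i => d.modify (translatePy (0, i.1, i.2, x)) [] (· ++ [i]))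
    (PySem.Dict.empty : PySem.Dict Int (List (Int × Int)))
  -- max(groups, default=1): max over the dict's keys, 1 when empty
  let maxSteps := (PySem.List.max? groups.keys (fun y => y)).getD 1
  let minVals := groups.getD maxSteps []
  -- min((a + b for a, b in minVals), default=…)
  let minValue := (PySem.List.min? (minVals.map (fun p => p.1 + p.2)) (fun y => y)).getD 999999999999999
  let finalMinVals := minVals.filter (fun p => p.1 + p.2 == minValue)
  (maxSteps, minVals, minValue, finalMinVals)

-- ===== PRECONDITION & SPEC =====
def Spec_compute (x : Int) (out : Int × (List (Int × Int)) × Int × (List (Int × Int))) : Prop := out = compute_alt x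
instance (x : Int) (out : Int × (List (Int × Int)) × Int × (List (Int × Int))) : Decidable (Spec_compute x out) := by unfold Spec_compute; infer_instance

-- ===== CLAIM (what is proved, stated in full; the proofs are below) =====
def Claim_equal_compute : Prop := ∀ (x : Int), Dom_compute x → Spec_compute x (compute x)

-- ===== LEMMAS AND PROOFS =====

theorem foldl_min_le_proj {α : Type} (k : α → Int) (T : List α) (c : Int) :
    T.foldl (fun a i => min a (k i)) c ≤ c ∧ ∀ i ∈ T, T.foldl (fun a i => min a (k i)) c ≤ k i := by
  have h := PySem.List.foldl_min_le (T.map k) c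
  rw [List.foldl_map] at h
  exact ⟨h.1, fun i hi => h.2 (k i) (List.mem_map_of_mem hi)⟩

-- characterization of A's running-max loop: final max and the filtered argmax list
theorem runmax {α : Type} (k : α → Int) (L : List α) : ∀ (m : Int) (vals : List α),
    L.foldl (fun s i => if k i > s.1 then (k i, [i]) else if k i = s.1 then (s.1, s.2 ++ [i]) else s) (m, vals)
    = (L.foldl (fun a i => max a (k i)) m,
       (if L.foldl (fun a i => max a (k i)) m = m then vals else [])
         ++ L.filter (fun i => decide (k i = L.foldl (fun a i => max a (k i)) m))) := by
  induction L with
  | nil => intro m vals; simp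
  | cons j T ih =>
    intro m vals
    by_cases h1 : k j > m
    · have hmax : max m (k j) = k j := by omega
      have hM : k j ≤ T.foldl (fun a i => max a (k i)) (k j) :=
        (PySem.List.le_foldl_max_int T k (k j)).1
      have hne : T.foldl (fun a i => max a (k i)) (k j) ≠ m := by omega
      simp only [List.foldl_cons, if_pos h1, hmax, ih, if_neg hne]
      by_cases h2 : T.foldl (fun a i => max a (k i)) (k j) = k j
      · simp [h2]
      · simp [h2,
          show k j ≠ T.foldl (fun a i => max a (k i)) (k j) from fun h => h2 h.symm]
    · have hmax : max m (k j) = m := by omega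
      by_cases h2 : k j = m
      · simp only [List.foldl_cons, if_neg h1, if_pos h2, ih, hmax]
        by_cases h3 : T.foldl (fun a i => max a (k i)) m = m
        · simp [h3, h2]
        · simp [h3, h2,
            show m ≠ T.foldl (fun a i => max a (k i)) m from fun h => h3 h.symm]
      · simp only [List.foldl_cons, if_neg h1, if_neg h2, ih, hmax]
        have hM : m ≤ T.foldl (fun a i => max a (k i)) m :=
          (PySem.List.le_foldl_max_int T k m).1
        have hkj : k j ≠ T.foldl (fun a i => max a (k i)) m := by omega
        simp [hkj]

-- characterization of A's running-min loop (second pass)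
theorem runmin {α : Type} (k : α → Int) (L : List α) : ∀ (m : Int) (vals : List α),
    L.foldl (fun s i => if k i < s.1 then (k i, [i]) else if s.1 = k i then (s.1, s.2 ++ [i]) else s) (m, vals)
    = (L.foldl (fun a i => min a (k i)) m,
       (if L.foldl (fun a i => min a (k i)) m = m then vals else [])
         ++ L.filter (fun i => decide (L.foldl (fun a i => min a (k i)) m = k i))) := by
  induction L with
  | nil => intro m vals; simp
  | cons j T ih =>
    intro m vals
    by_cases h1 : k j < m
    · have hmin : min m (k j) = k j := by omega
      have hM : T.foldl (fun a i => min a (k i)) (k j) ≤ k j :=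
        (foldl_min_le_proj k T (k j)).1
      have hne : T.foldl (fun a i => min a (k i)) (k j) ≠ m := by omega
      simp only [List.foldl_cons, if_pos h1, hmin, ih, if_neg hne]
      by_cases h2 : T.foldl (fun a i => min a (k i)) (k j) = k j
      · simp [h2]
      · simp [h2]
    · have hmin : min m (k j) = m := by omega
      by_cases h2 : m = k j
      · simp only [List.foldl_cons, if_neg h1, if_pos h2, ih, hmin]
        by_cases h3 : T.foldl (fun a i => min a (k i)) m = m
        · simp [h3, ← h2]
        · simp [h3, ← h2]
      · simp only [List.foldl_cons, if_neg h1, if_neg h2, ih, hmin]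
        have hM : T.foldl (fun a i => min a (k i)) m ≤ m :=
          (foldl_min_le_proj k T m).1
        have hkj : T.foldl (fun a i => min a (k i)) m ≠ k j := by omega
        simp [hkj]

theorem translateLoop_ge : ∀ (fuel : Nat) (count : Int) (t : Int × Int × Int × Int),
    count ≤ translateLoop fuel count t := by
  intro fuel
  induction fuel with
  | zero => intro count t; simp [translateLoop]
  | succ n ih =>
    intro count t
    obtain ⟨a, b, c, d⟩ := t
    simp only [translateLoop]
    split
    · have := ih (count + 1) (|a - b|, |b - c|, |c - d|, |d - a|); omega
    · omega

theorem translatePy_ge_one (t : Int × Int × Int × Int) : 1 ≤ translatePy t :=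
  translateLoop_ge 1000 1 t

theorem pairsOf_sum_lt (x : Int) (hx : x ≤ 2147483648) :
    ∀ p ∈ pairsOf x, p.1 + p.2 < 999999999999999 := by
  intro p hp
  unfold pairsOf at hp
  simp only [List.mem_flatMap, List.mem_map] at hp
  obtain ⟨a, ha, b, hb, rfl⟩ := hp
  rw [PySem.List.mem_pyRange_one] at ha hb
  simp only
  omega

-- ===== VERDICT (by name: the statement is the Claim_ definition above) =====
theorem compute_spec : Claim_equal_compute := by
  intro x hx
  have hx' : x ≤ 2147483648 := by
    unfold Dom_compute pvDomInt at hx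
    simp only [decide_eq_true_eq] at hx
    exact hx.2
  unfold Spec_compute
  -- A's first loop is a running max with its argmax list
  have hA1 : (pairsOf x).foldl
      (fun s i =>
        if translatePy (0, i.1, i.2, x) > s.1 then (translatePy (0, i.1, i.2, x), [i])
        else if translatePy (0, i.1, i.2, x) = s.1 then (s.1, s.2 ++ [i])
        else s) ((1 : Int), ([] : List (Int × Int)))
      = ((pairsOf x).foldl (fun a i => max a (translatePy (0, i.1, i.2, x))) 1,
         (pairsOf x).filter (fun i =>
           decide (translatePy (0, i.1, i.2, x)
             = (pairsOf x).foldl (fun a i => max a (translatePy (0, i.1, i.2, x))) 1))) := by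
    have h := runmax (fun i : Int × Int => translatePy (0, i.1, i.2, x)) (pairsOf x) 1 []
    simpa only [ite_self, List.nil_append] using h
  -- B's grouping dict: its keys and its lookups
  have hfold : (pairsOf x).foldl
      (fun d i => d.modify (translatePy (0, i.1, i.2, x)) [] (· ++ [i]))
      (PySem.Dict.empty : PySem.Dict Int (List (Int × Int)))
      = ((pairsOf x).map (fun i => (translatePy (0, i.1, i.2, x), i))).foldl
          (fun d p => d.modify p.1 [] (· ++ [p.2]))
          (PySem.Dict.empty : PySem.Dict Int (List (Int × Int))) :=
    (List.foldl_map (f := fun i : Int × Int => (translatePy (0, i.1, i.2, x), i))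
      (g := fun d p => PySem.Dict.modify d p.1 [] (· ++ [p.2]))
      (l := pairsOf x)
      (init := (PySem.Dict.empty : PySem.Dict Int (List (Int × Int))))).symm
  have hkeys : ((pairsOf x).foldl
      (fun d i => d.modify (translatePy (0, i.1, i.2, x)) [] (· ++ [i]))
      (PySem.Dict.empty : PySem.Dict Int (List (Int × Int)))).keys
      = PySem.Set.ofList ((pairsOf x).map (fun i => translatePy (0, i.1, i.2, x))) := by
    have h := PySem.Dict.keys_foldl_modify_key (pairsOf x)
      (fun i : Int × Int => translatePy (0, i.1, i.2, x)) ([] : List (Int × Int))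
      (fun _ i => (· ++ [i]))
      (PySem.Dict.empty : PySem.Dict Int (List (Int × Int)))
    simpa only [PySem.Dict.keys_empty, PySem.Set.update_nil_left] using h
  have hgetD : ∀ c : Int, (((pairsOf x).map (fun i => (translatePy (0, i.1, i.2, x), i))).foldl
      (fun d p => d.modify p.1 [] (· ++ [p.2]))
      (PySem.Dict.empty : PySem.Dict Int (List (Int × Int)))).getD c []
      = (pairsOf x).filter (fun i => decide (translatePy (0, i.1, i.2, x) = c)) := by
    intro c
    rw [PySem.Dict.getD_foldl_modify_append, List.filter_map, List.map_map]
    simp only [PySem.Dict.getD_empty, List.nil_append]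
    have hp : ((fun p : Int × (Int × Int) => p.1 == c) ∘ fun i : Int × Int => (translatePy (0, i.1, i.2, x), i))
        = fun i : Int × Int => decide (translatePy (0, i.1, i.2, x) = c) := by
      funext i; rfl
    have hm : ((fun p : Int × (Int × Int) => p.2) ∘ fun i : Int × Int => (translatePy (0, i.1, i.2, x), i))
        = fun i : Int × Int => i := by
      funext i; rfl
    rw [hp, hm, List.map_id']
  by_cases hP0 : pairsOf x = []
  · simp only [compute, compute_alt, hP0]
    rfl
  · obtain ⟨p0, P', hPcons⟩ := List.exists_cons_of_ne_nil hP0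
    have hp0 : p0 ∈ pairsOf x := by rw [hPcons]; exact List.mem_cons_self ..
    have hub : ∀ i ∈ pairsOf x, translatePy (0, i.1, i.2, x)
        ≤ (pairsOf x).foldl (fun a i => max a (translatePy (0, i.1, i.2, x))) 1 :=
      (PySem.List.le_foldl_max_int (pairsOf x) (fun i : Int × Int => translatePy (0, i.1, i.2, x)) 1).2
    have hMeq : ((pairsOf x).map (fun i : Int × Int => translatePy (0, i.1, i.2, x))).foldl max 1
        = (pairsOf x).foldl (fun a i => max a (translatePy (0, i.1, i.2, x))) 1 := List.foldl_map
    have hMmem : (pairsOf x).foldl (fun a i => max a (translatePy (0, i.1, i.2, x))) 1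
        ∈ (pairsOf x).map (fun i : Int × Int => translatePy (0, i.1, i.2, x)) := by
      rcases PySem.List.foldl_max_mem
          ((pairsOf x).map (fun i : Int × Int => translatePy (0, i.1, i.2, x))) 1 with h | h
      · have hM1one : (pairsOf x).foldl (fun a i => max a (translatePy (0, i.1, i.2, x))) 1 = 1 := by
          rw [← hMeq]; exact h
        have h2 := hub p0 hp0
        have h3 := translatePy_ge_one (0, p0.1, p0.2, x)
        have h4 : translatePy (0, p0.1, p0.2, x)
            = (pairsOf x).foldl (fun a i => max a (translatePy (0, i.1, i.2, x))) 1 := by omega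
        rw [← h4]
        exact List.mem_map_of_mem hp0
      · rwa [hMeq] at h
    -- reduce both sides
    simp only [compute, compute_alt]
    rw [hA1, hkeys]
    rcases hmax : PySem.List.max?
        (PySem.Set.ofList ((pairsOf x).map (fun i : Int × Int => translatePy (0, i.1, i.2, x))))
        (fun y => y) with _ | m
    · exfalso
      rw [PySem.List.max?_eq_none_iff] at hmax
      have hmm : (pairsOf x).foldl (fun a i => max a (translatePy (0, i.1, i.2, x))) 1
          ∈ PySem.Set.ofList ((pairsOf x).map (fun i : Int × Int => translatePy (0, i.1, i.2, x))) :=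
        (PySem.Set.mem_ofList _ _).mpr hMmem
      rw [hmax] at hmm
      simp at hmm
    · have hm1 : m ∈ (pairsOf x).map (fun i : Int × Int => translatePy (0, i.1, i.2, x)) :=
        (PySem.Set.mem_ofList _ _).mp (PySem.List.max?_mem hmax)
      have hmle : m ≤ (pairsOf x).foldl (fun a i => max a (translatePy (0, i.1, i.2, x))) 1 := by
        rcases List.mem_map.mp hm1 with ⟨i, hi, rfl⟩
        exact hub i hi
      have hMle : (pairsOf x).foldl (fun a i => max a (translatePy (0, i.1, i.2, x))) 1 ≤ m :=
        PySem.List.max?_isMax hmax _ ((PySem.Set.mem_ofList _ _).mpr hMmem)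
      have hmM : m = (pairsOf x).foldl (fun a i => max a (translatePy (0, i.1, i.2, x))) 1 :=
        le_antisymm hmle hMle
      simp only [Option.getD_some]
      rw [hmM, hfold, hgetD]
      -- second stage: compare on the common argmax list
      rcases hF : (pairsOf x).filter (fun i =>
          decide (translatePy (0, i.1, i.2, x)
            = (pairsOf x).foldl (fun a i => max a (translatePy (0, i.1, i.2, x))) 1))
        with _ | ⟨h0, t⟩
      · rw [hF]
        rfl
      · rw [hF]
        have hh0P : h0 ∈ pairsOf x := by
          have hmemF : h0 ∈ (pairsOf x).filter (fun i =>
              decide (translatePy (0, i.1, i.2, x)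
                = (pairsOf x).foldl (fun a i => max a (translatePy (0, i.1, i.2, x))) 1)) := by
            rw [hF]; exact List.mem_cons_self ..
          exact List.mem_of_mem_filter hmemF
        have hsum : h0.1 + h0.2 < 999999999999999 := pairsOf_sum_lt x hx' h0 hh0P
        have hA2 : (h0 :: t).foldl
            (fun s i =>
              if i.1 + i.2 < s.1 then (i.1 + i.2, [i])
              else if s.1 = i.1 + i.2 then (s.1, s.2 ++ [i])
              else s) ((999999999999999 : Int), ([] : List (Int × Int)))
            = ((h0 :: t).foldl (fun a i => min a (i.1 + i.2)) 999999999999999,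
               (h0 :: t).filter (fun i =>
                 decide ((h0 :: t).foldl (fun a i => min a (i.1 + i.2)) 999999999999999 = i.1 + i.2))) := by
          have h := runmin (fun i : Int × Int => i.1 + i.2) (h0 :: t) 999999999999999 []
          simpa only [ite_self, List.nil_append] using h
        have hBmin : PySem.List.min? ((h0 :: t).map (fun p : Int × Int => p.1 + p.2)) (fun y => y)
            = some ((h0 :: t).foldl (fun a i => min a (i.1 + i.2)) 999999999999999) := by
          rw [List.map_cons, PySem.List.min?_id_cons, List.foldl_map, List.foldl_cons,
            show min (999999999999999 : Int) (h0.1 + h0.2) = h0.1 + h0.2 from by omega]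
        rw [hA2, hBmin]
        simp only [Option.getD_some, Prod.mk.injEq]
        refine ⟨trivial, trivial, trivial, ?_⟩
        exact List.filter_congr (fun p _ => decide_eq_decide.mpr eq_comm)
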